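-- pv_equiv track=rewrite | github.com/pluginagentmarketplace/custom-plugin-aws | skills/database-design/scripts/migration_manager.py | _extract_up_migration
-- ===== SOURCE A (Python) =====
-- def _extract_up_migration(content: str) -> str:
--     """Extract up migration SQL from file content."""
--     lines = content.split("\n")
--     up_lines = []
--     in_rollback = False
--
--     for line in lines:
--         if "@rollback" in line.lower():
--             in_rollback = True
--             continue
--         if not in_rollback and not line.strip().startswith("--"):
--             up_lines.append(line)
--
--     return "\n".join(up_lines)
-- ===== SOURCE B (Python) =====
-- def _extract_up_migration(content: str) -> str:
--     """Extract up migration SQL from file content."""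
--     p = content.lower().find("@rollback")
--     if p == -1:
--         pre = content.split("\n")
--     else:
--         pre = content[:p].split("\n")[:-1]
--     return "\n".join(l for l in pre if not l.strip().startswith("--"))
-- ===== Notes on version B (the rewrite author's own statement) =====
-- stated objective: alternative
-- what changed: Replaces A's line-by-line scan with a sticky in_rollback flag by a whole-string algorithm: one case-insensitive substring search over the entire text locates the marker, the raw text is sliced at that character position, and only then is the slice split into lines (dropping the trailing partial marker line) and filtered for SQL comment lines.
import Mathlib
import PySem

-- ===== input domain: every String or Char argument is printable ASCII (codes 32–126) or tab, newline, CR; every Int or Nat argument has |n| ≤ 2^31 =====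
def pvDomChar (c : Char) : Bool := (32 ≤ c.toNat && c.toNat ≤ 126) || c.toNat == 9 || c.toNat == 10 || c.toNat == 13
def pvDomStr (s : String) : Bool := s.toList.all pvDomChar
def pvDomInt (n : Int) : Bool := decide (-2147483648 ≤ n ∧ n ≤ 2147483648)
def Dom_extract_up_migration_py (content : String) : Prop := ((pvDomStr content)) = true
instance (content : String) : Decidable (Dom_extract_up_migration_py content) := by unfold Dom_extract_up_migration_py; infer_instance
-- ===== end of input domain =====

-- B replaces A's per-line loop with a sticky in_rollback flag by a whole-string algorithm:
-- one case-insensitive find of "@rollback" over the raw text, a character-level slice at that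
-- position, then split-into-lines (dropping the partial marker line) and comment-line filtering
-- (objective: alternative).


-- ===== PORT A =====
-- A's loop body: sticky rollback flag, append non-comment lines while the flag is off
def pvStepA (st : List String × Bool) (line : String) : List String × Bool :=
  if PySem.Str.isIn "@rollback" (PySem.Str.lower line) then (st.1, true)
  else if !st.2 && !(PySem.Str.startswith (PySem.Str.strip line) "--") then (st.1 ++ [line], st.2)
  else st

def extract_up_migration_py (content : String) : String :=
  let lines := (PySem.Str.split? content "\n").getD []
  let st := lines.foldl pvStepA ([], false)
  PySem.Str.join "\n" st.1

-- ===== PORT B =====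
-- Source B: p = content.lower().find("@rollback"); pre = content.split("\n") if p == -1
--       else content[:p].split("\n")[:-1]; join the non-comment lines of pre
def extract_up_migration_py_alt (content : String) : String :=
  let p := PySem.Str.find (PySem.Str.lower content) "@rollback"
  let pre := if p = -1 then (PySem.Str.split? content "\n").getD []
             else PySem.List.slice
               ((PySem.Str.split? (PySem.Str.slice content none (some p)) "\n").getD [])
               none (some (-1))
  PySem.Str.join "\n" (pre.filter (fun l => !(PySem.Str.startswith (PySem.Str.strip l) "--")))

-- ===== PRECONDITION & SPEC =====
def Spec_extract_up_migration_py (content : String) (out : String) : Prop := out = extract_up_migration_py_alt content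
instance (content : String) (out : String) : Decidable (Spec_extract_up_migration_py content out) := by unfold Spec_extract_up_migration_py; infer_instance

-- ===== CLAIM =====
def Claim_equal_extract_up_migration_py : Prop := ∀ (content : String), Dom_extract_up_migration_py content → Spec_extract_up_migration_py content (extract_up_migration_py content)

-- ===== LEMMAS AND PROOFS =====
def pvSplit : List Char → List (List Char)
  | [] => [[]]
  | c :: rest =>
    if c = '\n' then [] :: pvSplit rest
    else match pvSplit rest with
      | h :: t => (c :: h) :: t
      | [] => [[c]]

def pvGlue (pre : List Char) : List (List Char) → List (List Char)
  | h :: t => (pre ++ h) :: t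
  | [] => [pre]

theorem pvSplit_ne_nil (cs : List Char) : pvSplit cs ≠ [] := by
  cases cs with
  | nil => simp [pvSplit]
  | cons c rest =>
    simp only [pvSplit]
    split
    · simp
    · rcases h : pvSplit rest with _ | ⟨a, b⟩ <;> simp

theorem pvGo_spec (fuel : Nat) : ∀ (l cur : List Char) (accs : List (List Char)),
    l.length ≤ fuel →
    PySem.Chars.splitOn.go ['\n'] fuel l cur accs =
      accs.reverse ++ pvGlue cur.reverse (pvSplit l) := by
  induction fuel with
  | zero =>
    intro l cur accs h
    have : l = [] := List.length_eq_zero_iff.mp (Nat.le_zero.mp h)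
    subst this
    simp [PySem.Chars.splitOn.go, pvSplit, pvGlue]
  | succ n ih =>
    intro l cur accs h
    cases l with
    | nil => simp [PySem.Chars.splitOn.go, pvSplit, pvGlue]
    | cons c rest =>
      by_cases hc : c = '\n'
      · subst hc
        rw [show PySem.Chars.splitOn.go ['\n'] (n+1) ('\n' :: rest) cur accs =
            PySem.Chars.splitOn.go ['\n'] n (List.drop 1 ('\n'::rest)) [] (cur.reverse :: accs) from by
          simp [PySem.Chars.splitOn.go, List.isPrefixOf]]
        rw [List.drop_one, List.tail_cons, ih rest [] _ (by simpa using h)]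
        rcases hs : pvSplit rest with _ | ⟨a, b⟩
        · exact absurd hs (pvSplit_ne_nil rest)
        · simp [pvSplit, hs, pvGlue]
      · rw [show PySem.Chars.splitOn.go ['\n'] (n+1) (c :: rest) cur accs =
            PySem.Chars.splitOn.go ['\n'] n rest (c :: cur) accs from by
          rw [PySem.Chars.splitOn.go]
          simp only [List.isPrefixOf, List.isPrefixOf_nil_left, Bool.and_true]
          rw [if_neg (by simpa using fun h => hc h.symm)]]
        rw [ih rest (c :: cur) accs (by simpa using h)]
        rcases hs : pvSplit rest with _ | ⟨a, b⟩
        · exact absurd hs (pvSplit_ne_nil rest)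
        · simp [pvSplit, hs, pvGlue, hc]

theorem pvSplitOn_eq (cs : List Char) : PySem.Chars.splitOn cs ['\n'] = pvSplit cs := by
  rw [PySem.Chars.splitOn, pvGo_spec (cs.length + 1) cs [] [] (by omega)]
  rcases hs : pvSplit cs with _ | ⟨a, b⟩
  · exact absurd hs (pvSplit_ne_nil cs)
  · simp [pvGlue]

theorem pvSplit_no_nl {cs : List Char} (h : '\n' ∉ cs) : pvSplit cs = [cs] := by
  induction cs with
  | nil => rfl
  | cons c rest ih =>
    simp only [List.mem_cons, not_or] at h
    rw [pvSplit, if_neg (fun hc => h.1 hc.symm), ih h.2]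

theorem pvSplit_append {l : List Char} (rest : List Char) (h : '\n' ∉ l) :
    pvSplit (l ++ '\n' :: rest) = l :: pvSplit rest := by
  induction l with
  | nil => simp [pvSplit]
  | cons c t ih =>
    simp only [List.mem_cons, not_or] at h
    rw [List.cons_append, pvSplit, if_neg (fun hc => h.1 hc.symm), ih h.2]

theorem pvDecomp {cs : List Char} (h : '\n' ∈ cs) :
    ∃ l rest, cs = l ++ '\n' :: rest ∧ '\n' ∉ l := by
  induction cs with
  | nil => simp at h
  | cons c t ih =>
    by_cases hc : c = '\n'
    · exact ⟨[], t, by simp [hc], by simp⟩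
    · have ht : '\n' ∈ t := by
        rcases List.mem_cons.mp h with h | h
        · exact absurd h.symm hc
        · exact h
      rcases ih ht with ⟨l, rest, hrw, hnl⟩
      refine ⟨c :: l, rest, by simp [hrw], ?_⟩
      simp only [List.mem_cons, not_or]
      exact ⟨fun hx => hc hx.symm, hnl⟩

theorem pvPrefix_left {α : Type} {p u v : List α} (h : p <+: u ++ v)
    (hl : p.length ≤ u.length) : p <+: u := by
  have h1 := List.prefix_iff_eq_take.mp h
  rw [List.take_append, Nat.sub_eq_zero_of_le hl, List.take_zero,
      List.append_nil] at h1
  rw [h1]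
  exact List.take_prefix _ _

theorem pvOcc_infix {p a : List Char} {m : Nat} (h : p <+: a.drop m) : p <:+: a :=
  List.IsInfix.trans h.isInfix (List.drop_suffix m a).isInfix

theorem pvOcc_split {p a b : List Char} {m : Nat} (hnl : '\n' ∉ p)
    (h : p <+: (a ++ '\n' :: b).drop m) :
    (m + p.length ≤ a.length ∧ p <+: a.drop m) ∨
    (a.length + 1 ≤ m ∧ p <+: b.drop (m - a.length - 1)) := by
  by_cases hm : m + p.length ≤ a.length
  · left
    refine ⟨hm, ?_⟩
    rw [List.drop_append, Nat.sub_eq_zero_of_le (by omega), List.drop_zero] at h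
    exact pvPrefix_left h (by simp; omega)
  · by_cases hm2 : m ≤ a.length
    · exfalso
      have hj : a.length - m < p.length := by omega
      have hget := h.getElem hj
      rw [List.getElem_drop] at hget
      have hy : ∀ (i : Nat) (hi : i < (a ++ '\n' :: b).length), i = a.length →
          (a ++ '\n' :: b)[i] = '\n' := by
        intro i hi hieq
        subst hieq
        rw [List.getElem_append_right (by omega)]
        simp
      rw [hy _ _ (by omega)] at hget
      exact hnl (hget ▸ List.getElem_mem hj)
    · right
      refine ⟨by omega, ?_⟩
      rw [List.drop_append, List.drop_eq_nil_of_le (by omega),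
          List.nil_append] at h
      have hx : m - a.length = (m - a.length - 1) + 1 := by omega
      rw [hx, List.drop_succ_cons] at h
      exact h

theorem pvOcc_right {p a b : List Char} {q : Nat} (h : p <+: b.drop q) :
    p <+: (a ++ '\n' :: b).drop (a.length + 1 + q) := by
  rw [List.drop_append, List.drop_eq_nil_of_le (by omega), List.nil_append]
  have hx : a.length + 1 + q - a.length = q + 1 := by omega
  rw [hx, List.drop_succ_cons]
  exact h

theorem pvFind_app {p a b : List Char} (hnl : '\n' ∉ p) (ha : ¬ p <:+: a) :
    PySem.Chars.find (a ++ '\n' :: b) p =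
      if PySem.Chars.find b p = -1 then -1
      else (a.length : Int) + 1 + PySem.Chars.find b p := by
  by_cases hb : PySem.Chars.find b p = -1
  · rw [if_pos hb]
    rw [PySem.Chars.find_eq_neg_one_iff] at hb ⊢
    intro hin
    have hocc : ∃ j, p <+: (a ++ '\n' :: b).drop j := by
      rw [PySem.Chars.exists_prefix_drop_iff_isIn, PySem.Chars.isIn_iff_infix]
      exact hin
    rcases hocc with ⟨j, hj⟩
    rcases pvOcc_split hnl hj with ⟨_, h1⟩ | ⟨_, h2⟩
    · exact ha (pvOcc_infix h1)
    · exact hb (pvOcc_infix h2)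
  · rw [if_neg hb]
    have hq0 : 0 ≤ PySem.Chars.find b p := by
      have := PySem.Chars.neg_one_le_find b p
      omega
    obtain ⟨hqocc, hqmin⟩ := PySem.Chars.find_spec hq0
    set q : Nat := (PySem.Chars.find b p).toNat with hqdef
    -- occurrence of p in the whole at a.length + 1 + q
    have hwocc : p <+: (a ++ '\n' :: b).drop (a.length + 1 + q) := pvOcc_right hqocc
    have hf0 : 0 ≤ PySem.Chars.find (a ++ '\n' :: b) p := by
      rw [PySem.Chars.find_nonneg_iff]
      exact pvOcc_infix hwocc
    obtain ⟨hfocc, hfmin⟩ := PySem.Chars.find_spec hf0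
    set f : Nat := (PySem.Chars.find (a ++ '\n' :: b) p).toNat with hfdef
    have hfm : f = a.length + 1 + q := by
      rcases Nat.lt_trichotomy f (a.length + 1 + q) with hlt | heq | hgt
      · rcases pvOcc_split hnl hfocc with ⟨_, h1⟩ | ⟨hge, h2⟩
        · exact absurd (pvOcc_infix h1) ha
        · exact absurd h2 (hqmin _ (by omega))
      · exact heq
      · exact absurd hwocc (hfmin _ hgt)
    omega

def pvPat : List Char := "@rollback".toList

def pvIdxC : List (List Char) → Nat
  | [] => 0
  | l :: r => if PySem.Chars.isIn pvPat (PySem.Chars.lower l) then 0 else pvIdxC r + 1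

theorem pvPat_nl : '\n' ∉ pvPat := by decide

theorem pvLower_append (l r : List Char) :
    PySem.Chars.lower (l ++ '\n' :: r) =
      PySem.Chars.lower l ++ '\n' :: PySem.Chars.lower r := by
  have h : PySem.Chars.lowerChar '\n' = '\n' := by decide
  simp [PySem.Chars.lower, h]

theorem pvLower_len (l : List Char) : (PySem.Chars.lower l).length = l.length := by
  simp [PySem.Chars.lower]

theorem pvMain : ∀ (n : Nat) (cs : List Char), cs.length ≤ n →
    ((¬ pvPat <:+: PySem.Chars.lower cs) →
        pvIdxC (pvSplit cs) = (pvSplit cs).length) ∧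
    (0 ≤ PySem.Chars.find (PySem.Chars.lower cs) pvPat →
        (pvSplit (cs.take (PySem.Chars.find (PySem.Chars.lower cs) pvPat).toNat)).dropLast
          = (pvSplit cs).take (pvIdxC (pvSplit cs))) := by
  intro n
  induction n using Nat.strong_induction_on with
  | _ n ih =>
    intro cs hlen
    by_cases hn : '\n' ∈ cs
    · rcases pvDecomp hn with ⟨l, rest, rfl, hnl⟩
      rw [pvSplit_append rest hnl, pvLower_append]
      constructor
      · intro hni
        have hml : ¬ PySem.Chars.isIn pvPat (PySem.Chars.lower l) = true := by
          rw [PySem.Chars.isIn_iff_infix]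
          intro h
          exact hni (h.trans ⟨[], '\n' :: PySem.Chars.lower rest, by simp⟩)
        have hrest : ¬ pvPat <:+: PySem.Chars.lower rest := by
          intro h
          exact hni (h.trans ⟨PySem.Chars.lower l ++ ['\n'], [], by simp⟩)
        have ihr := (ih rest.length (by simp at hlen; omega) rest le_rfl).1 hrest
        simp only [pvIdxC, if_neg hml, List.length_cons]
        omega
      · intro hpos
        by_cases hml : pvPat <:+: PySem.Chars.lower l
        · -- marker in the first line: cut lands inside l, both sides are []
          have hml' : PySem.Chars.isIn pvPat (PySem.Chars.lower l) = true := by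
            rw [PySem.Chars.isIn_iff_infix]; exact hml
          simp only [pvIdxC, if_pos hml', List.take_zero]
          -- the first occurrence starts within l
          rcases hml with ⟨pre, suf, heq⟩
          have h1 : (PySem.Chars.lower l ++ '\n' :: PySem.Chars.lower rest)
              = pre ++ (pvPat ++ (suf ++ '\n' :: PySem.Chars.lower rest)) := by
            rw [← heq]; simp
          have hocc : pvPat <+:
              (PySem.Chars.lower l ++ '\n' :: PySem.Chars.lower rest).drop pre.length := by
            rw [h1, List.drop_left]
            exact List.prefix_append _ _
          obtain ⟨_, hfmin⟩ := PySem.Chars.find_spec hpos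
          have hprelen : pre.length + pvPat.length ≤ l.length := by
            have h2 := congrArg List.length heq
            rw [pvLower_len] at h2
            simp at h2
            omega
          have hle : (PySem.Chars.find (PySem.Chars.lower l ++ '\n' :: PySem.Chars.lower rest)
              pvPat).toNat ≤ l.length := by
            by_contra hgt
            exact hfmin pre.length (by omega) hocc
          have hnltake : '\n' ∉ (l ++ '\n' :: rest).take
              (PySem.Chars.find (PySem.Chars.lower l ++ '\n' :: PySem.Chars.lower rest)
                pvPat).toNat := by
            rw [List.take_append, Nat.sub_eq_zero_of_le hle, List.take_zero, List.append_nil]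
            exact fun h => hnl (List.mem_of_mem_take h)
          rw [pvSplit_no_nl hnltake]
          rfl
        · -- marker not in the first line: recurse on the tail
          have hml' : ¬ PySem.Chars.isIn pvPat (PySem.Chars.lower l) = true := by
            rw [PySem.Chars.isIn_iff_infix]; exact hml
          have happ := pvFind_app (a := PySem.Chars.lower l) (b := PySem.Chars.lower rest)
            pvPat_nl hml
          by_cases hq : PySem.Chars.find (PySem.Chars.lower rest) pvPat = -1
          · rw [happ, if_pos hq] at hpos
            omega
          · have hq0 : 0 ≤ PySem.Chars.find (PySem.Chars.lower rest) pvPat := by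
              have := PySem.Chars.neg_one_le_find (PySem.Chars.lower rest) pvPat
              omega
            have hf : (PySem.Chars.find (PySem.Chars.lower l ++ '\n' :: PySem.Chars.lower rest)
                pvPat).toNat
                = l.length + 1 + (PySem.Chars.find (PySem.Chars.lower rest) pvPat).toNat := by
              rw [happ, if_neg hq, pvLower_len]
              omega
            rw [hf]
            have htake : (l ++ '\n' :: rest).take
                (l.length + 1 + (PySem.Chars.find (PySem.Chars.lower rest) pvPat).toNat)
                = l ++ '\n' :: rest.take (PySem.Chars.find (PySem.Chars.lower rest)
                    pvPat).toNat := by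
              rw [List.take_append]
              rw [List.take_of_length_le (by omega)]
              congr 1
              have h3 : l.length + 1 + (PySem.Chars.find (PySem.Chars.lower rest)
                  pvPat).toNat - l.length
                  = (PySem.Chars.find (PySem.Chars.lower rest) pvPat).toNat + 1 := by omega
              rw [h3, List.take_succ_cons]
            rw [htake, pvSplit_append _ hnl]
            have ihr := (ih rest.length (by simp at hlen; omega) rest le_rfl).2 hq0
            simp only [pvIdxC, if_neg hml']
            rcases hps : pvSplit (rest.take (PySem.Chars.find (PySem.Chars.lower rest)
                pvPat).toNat) with _ | ⟨a, b⟩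
            · exact absurd hps (pvSplit_ne_nil _)
            · rw [List.dropLast_cons₂, ← hps, ihr, List.take_succ_cons]
    · -- no newline: a single line
      rw [pvSplit_no_nl hn]
      constructor
      · intro hni
        have hml : ¬ PySem.Chars.isIn pvPat (PySem.Chars.lower cs) = true := by
          rw [PySem.Chars.isIn_iff_infix]; exact hni
        simp [pvIdxC, hml]
      · intro hpos
        have hml : PySem.Chars.isIn pvPat (PySem.Chars.lower cs) = true := by
          rw [PySem.Chars.isIn_iff_infix]
          exact (PySem.Chars.find_nonneg_iff _ _).mp hpos
        simp only [pvIdxC, if_pos hml, List.take_zero]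
        have hnt : '\n' ∉ cs.take (PySem.Chars.find (PySem.Chars.lower cs) pvPat).toNat :=
          fun h => hn (List.mem_of_mem_take h)
        rw [pvSplit_no_nl hnt]
        rfl

def pvIdx : List String → Nat
  | [] => 0
  | l :: r => if PySem.Str.isIn "@rollback" (PySem.Str.lower l) then 0 else pvIdx r + 1

theorem pvIdx_map (L : List String) : pvIdx L = pvIdxC (L.map String.toList) := by
  induction L with
  | nil => rfl
  | cons l r ih =>
    simp only [pvIdx, pvIdxC, List.map_cons, PySem.Str.isIn_eq, PySem.Str.toList_lower, ih]
    rfl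

theorem pvLines (s : String) : ∃ L, PySem.Str.split? s "\n" = some L ∧
    L.map String.toList = pvSplit s.toList := by
  have h := PySem.Str.split?_map s "\n"
  rw [show ("\n" : String).toList = ['\n'] from by decide] at h
  rw [PySem.Chars.split?] at h
  rw [if_neg (by decide)] at h
  rcases ho : PySem.Str.split? s "\n" with _ | L
  · rw [ho] at h; simp at h
  · rw [ho] at h
    simp only [Option.map_some, Option.some.injEq] at h
    exact ⟨L, rfl, by rw [h, pvSplitOn_eq]⟩

theorem pvMapInj {L1 L2 : List String} (h : L1.map String.toList = L2.map String.toList) :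
    L1 = L2 :=
  List.map_injective_iff.mpr (fun _ _ hx => String.toList_inj.mp hx) h

theorem pvFoldA_true (lines : List String) (acc : List String) :
    lines.foldl pvStepA (acc, true) = (acc, true) := by
  induction lines with
  | nil => rfl
  | cons l rest ih =>
    simp only [List.foldl_cons, pvStepA]
    split <;> simp [ih]

theorem pvFoldA_false (lines : List String) (acc : List String) :
    (lines.foldl pvStepA (acc, false)).1 =
      acc ++ (lines.take (pvIdx lines)).filter
        (fun l => !(PySem.Str.startswith (PySem.Str.strip l) "--")) := by
  induction lines generalizing acc with
  | nil => simp
  | cons l rest ih =>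
    simp only [List.foldl_cons, pvStepA, pvIdx]
    by_cases h : PySem.Str.isIn "@rollback" (PySem.Str.lower l) = true
    · rw [if_pos h, if_pos h, pvFoldA_true]
      simp
    · rw [if_neg h, if_neg h, List.take_succ_cons]
      cases hc : PySem.Str.startswith (PySem.Str.strip l) "--" with
      | false =>
        rw [if_pos (by decide), ih (acc ++ [l]),
            List.filter_cons_of_pos
              (by show (!PySem.Str.startswith (PySem.Str.strip l) "--") = true; rw [hc]; rfl)]
        simp
      | true =>
        rw [if_neg (by decide), ih acc,
            List.filter_cons_of_neg
              (by show ¬((!PySem.Str.startswith (PySem.Str.strip l) "--") = true); rw [hc]; simp)]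

theorem pvPorts_eq (content : String) :
    extract_up_migration_py content = extract_up_migration_py_alt content := by
  unfold extract_up_migration_py extract_up_migration_py_alt
  obtain ⟨L, hL, hLmap⟩ := pvLines content
  rw [hL]
  simp only [Option.getD_some]
  rw [pvFoldA_false L []]
  simp only [List.nil_append]
  have hfind : PySem.Str.find (PySem.Str.lower content) "@rollback"
      = PySem.Chars.find (PySem.Chars.lower content.toList) pvPat := by
    rw [PySem.Str.find_eq, PySem.Str.toList_lower]
    rfl
  congr 1
  by_cases hp : PySem.Str.find (PySem.Str.lower content) "@rollback" = -1
  · rw [if_pos hp]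
    have hni : ¬ pvPat <:+: PySem.Chars.lower content.toList := by
      rw [← PySem.Chars.find_eq_neg_one_iff, ← hfind]
      exact hp
    have h1 := (pvMain content.toList.length content.toList le_rfl).1 hni
    congr 1
    have : pvIdx L = L.length := by
      rw [pvIdx_map, hLmap, h1, ← hLmap, List.length_map]
    rw [this, List.take_length]
  · rw [if_neg hp]
    have hp0 : 0 ≤ PySem.Str.find (PySem.Str.lower content) "@rollback" := by
      have := PySem.Chars.neg_one_le_find (PySem.Chars.lower content.toList) pvPat
      rw [← hfind] at this
      omega
    obtain ⟨L2, hL2, hL2map⟩ := pvLines (PySem.Str.slice content none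
      (some (PySem.Str.find (PySem.Str.lower content) "@rollback")))
    rw [hL2]
    simp only [Option.getD_some]
    rw [PySem.List.slice_to_neg_one]
    have hsl : (PySem.Str.slice content none
        (some (PySem.Str.find (PySem.Str.lower content) "@rollback"))).toList
        = content.toList.take
            (PySem.Str.find (PySem.Str.lower content) "@rollback").toNat := by
      rw [PySem.Str.toList_slice, PySem.Chars.slice_eq_listSlice, PySem.List.slice_to content.toList hp0]
    have h2 := (pvMain content.toList.length content.toList le_rfl).2 (hfind ▸ hp0)
    have hlist : List.take (pvIdx L) L = L2.dropLast := by
      apply pvMapInj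
      rw [List.map_take, List.map_dropLast, hL2map, hsl, pvIdx_map, hLmap, hfind]
      exact h2.symm
    rw [hlist]

-- ===== VERDICT =====
theorem extract_up_migration_py_spec : Claim_equal_extract_up_migration_py := by
  intro content _
  unfold Spec_extract_up_migration_py
  exact pvPorts_eq content
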